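-- pv_equiv track=rewrite | github.com/Faiz-zz-zz/gm | gm.py | not_intersect
-- ===== SOURCE A (Python) =====
-- HORIZONTAL = 1
--
-- SHIP_LENGTH = 5
--
-- def not_intersect(s1, s1_dir, s2, s2_dir):
--     locs = set()
--     if s1_dir == HORIZONTAL:
--         for s1_j in range(s1[1], s1[1] + SHIP_LENGTH):
--             locs.add((s1[0], s1_j))
--     else:
--         for s1_i in range(s1[0], s1[0] + SHIP_LENGTH):
--             locs.add((s1_i, s1[1]))
--
--     if s2_dir == HORIZONTAL:
--         for s2_j in range(s2[1], s2[1] + SHIP_LENGTH):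
--             if (s2[0], s2_j) in locs: return False
--     else:
--         for s2_i in range(s2[0], s2[0] + SHIP_LENGTH):
--             if (s2_i, s2[1]) in locs: return False
--     return True
-- ===== SOURCE B (Python) =====
-- HORIZONTAL = 1
--
-- SHIP_LENGTH = 5
--
-- def not_intersect(s1, s1_dir, s2, s2_dir):
--     h1 = s1_dir == HORIZONTAL
--     h2 = s2_dir == HORIZONTAL
--     if h1 == h2:
--         (fixed1, start1) = (s1[0], s1[1]) if h1 else (s1[1], s1[0])
--         (fixed2, start2) = (s2[0], s2[1]) if h2 else (s2[1], s2[0])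
--         return not (fixed1 == fixed2 and abs(start1 - start2) <= SHIP_LENGTH - 1)
--     (r, c) = (s1[0], s1[1]) if h1 else (s2[0], s2[1])   # the horizontal ship
--     (R, C) = (s2[0], s2[1]) if h1 else (s1[0], s1[1])   # the vertical ship
--     return not (c <= C <= c + SHIP_LENGTH - 1 and R <= r <= R + SHIP_LENGTH - 1)
-- ===== Notes on version B (the rewrite author's own statement) =====
-- stated objective: simpler
-- what changed: Replaced the cell-set construction and membership loops by a closed-form interval-overlap test on the two ships' coordinates.
import Mathlib
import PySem

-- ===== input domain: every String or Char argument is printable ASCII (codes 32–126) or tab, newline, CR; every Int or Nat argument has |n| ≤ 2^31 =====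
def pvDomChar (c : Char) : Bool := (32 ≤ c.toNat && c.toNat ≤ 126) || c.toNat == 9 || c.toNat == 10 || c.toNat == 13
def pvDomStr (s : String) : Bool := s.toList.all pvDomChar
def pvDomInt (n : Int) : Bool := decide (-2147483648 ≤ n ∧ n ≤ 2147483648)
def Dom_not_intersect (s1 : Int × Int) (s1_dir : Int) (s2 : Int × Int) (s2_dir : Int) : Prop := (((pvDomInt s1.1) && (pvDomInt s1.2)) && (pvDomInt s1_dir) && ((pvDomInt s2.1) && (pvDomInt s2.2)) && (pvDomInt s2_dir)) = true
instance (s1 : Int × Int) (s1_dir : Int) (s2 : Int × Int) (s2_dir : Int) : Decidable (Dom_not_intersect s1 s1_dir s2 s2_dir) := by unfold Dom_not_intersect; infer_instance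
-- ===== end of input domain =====

-- B replaces A's cell-set construction and membership scan by a closed-form
-- interval-overlap test on the ships' coordinates (objective: simpler).

-- ===== PORT A =====
-- literal transliteration of A: build the set of s1's cells, then scan s2's cells
-- with early return (= List.any) on membership
def not_intersect (s1 : Int × Int) (s1_dir : Int) (s2 : Int × Int) (s2_dir : Int) : Bool :=
  let locs : PySem.Set (Int × Int) :=
    if s1_dir == 1 then
      (PySem.List.pyRange s1.2 (s1.2 + 5) 1).foldl (fun l b => PySem.Set.add l (s1.1, b)) PySem.Set.empty
    else
      (PySem.List.pyRange s1.1 (s1.1 + 5) 1).foldl (fun l b => PySem.Set.add l (b, s1.2)) PySem.Set.empty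
  if s2_dir == 1 then
    !((PySem.List.pyRange s2.2 (s2.2 + 5) 1).any (fun j => PySem.Set.contains locs (s2.1, j)))
  else
    !((PySem.List.pyRange s2.1 (s2.1 + 5) 1).any (fun i => PySem.Set.contains locs (i, s2.2)))

-- ===== PORT B =====
-- literal transliteration of Source B: closed-form interval-overlap test
def not_intersect_alt (s1 : Int × Int) (s1_dir : Int) (s2 : Int × Int) (s2_dir : Int) : Bool :=
  let h1 := s1_dir == 1
  let h2 := s2_dir == 1
  if h1 == h2 then
    let p1 := if h1 then (s1.1, s1.2) else (s1.2, s1.1)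
    let p2 := if h2 then (s2.1, s2.2) else (s2.2, s2.1)
    !(p1.1 == p2.1 && |p1.2 - p2.2| ≤ 5 - 1)
  else
    let rc := if h1 then (s1.1, s1.2) else (s2.1, s2.2)
    let RC := if h1 then (s2.1, s2.2) else (s1.1, s1.2)
    !(decide (rc.2 ≤ RC.2 ∧ RC.2 ≤ rc.2 + 5 - 1) && decide (RC.1 ≤ rc.1 ∧ rc.1 ≤ RC.1 + 5 - 1))

-- ===== PRECONDITION & SPEC =====
def Spec_not_intersect (s1 : Int × Int) (s1_dir : Int) (s2 : Int × Int) (s2_dir : Int) (out : Bool) : Prop := out = not_intersect_alt s1 s1_dir s2 s2_dir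
instance (s1 : Int × Int) (s1_dir : Int) (s2 : Int × Int) (s2_dir : Int) (out : Bool) : Decidable (Spec_not_intersect s1 s1_dir s2 s2_dir out) := by unfold Spec_not_intersect; infer_instance

-- ===== CLAIM (what is proved, stated in full; the proofs are below) =====
def Claim_equal_not_intersect : Prop := ∀ (s1 : Int × Int) (s1_dir : Int) (s2 : Int × Int) (s2_dir : Int), Dom_not_intersect s1 s1_dir s2 s2_dir → Spec_not_intersect s1 s1_dir s2 s2_dir (not_intersect s1 s1_dir s2 s2_dir)

-- ===== LEMMAS AND PROOFS =====

-- ===== VERDICT (by name: the statement is the Claim_ definition above) =====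
theorem not_intersect_spec : Claim_equal_not_intersect := by
  intro ⟨a, b⟩ d1 ⟨c, d⟩ d2 _
  unfold Spec_not_intersect not_intersect not_intersect_alt
  by_cases h1 : d1 = 1 <;> by_cases h2 : d2 = 1 <;>
    simp [h1, h2, PySem.Set.mem_foldl_add, PySem.List.mem_pyRange_one,
      PySem.Set.empty, Prod.mk.injEq, abs_le] <;>
    rw [Bool.eq_iff_iff] <;>
    simp only [List.any_eq_true, PySem.List.mem_pyRange_one, Bool.and_eq_true,
      decide_eq_true_eq, beq_iff_eq]
  · constructor
    · rintro ⟨j, hj, hb⟩; omega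
    · intro h; refine ⟨max b d, ?_, ?_⟩ <;> omega
  · constructor
    · rintro ⟨i, hi, hb⟩; omega
    · intro h; refine ⟨a, ?_, ?_⟩ <;> omega
  · constructor
    · rintro ⟨j, hj, hb⟩; omega
    · intro h; refine ⟨b, ?_, ?_⟩ <;> omega
  · constructor
    · rintro ⟨i, hi, hb⟩; omega
    · intro h; refine ⟨max a c, ?_, ?_⟩ <;> omega
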